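-- pv_equiv track=rewrite | github.com/Honno/code-solutions | challenges/foobar-py/?_substring_from_primes.py | solution
-- ===== SOURCE A (Python) =====
-- from collections import defaultdict
--
-- ID_LEN = 5
--
-- def gen_primes():
--     """Using the Sieve of Erastothenes solution"""
--     composites = defaultdict(list)
--     checker = 2
--
--     while True:
--         if checker not in composites:
--             yield checker
--             composites[checker*checker].append(checker)
--         else:
--             for prime in composites[checker]:
--                 composites[prime+checker].append(prime)
--             del composites[checker]
--
--         checker += 1
--
-- def solution(i):
--     pointer = 0
--     id_ = ''
--     primes = gen_primes()
--
--     while True: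
--         prime_str = str(next(primes))
--         threshold = pointer + len(prime_str) - i
--         if threshold > 0:
--             prime_str = prime_str[i-pointer:]
--             while len(id_) < ID_LEN:
--                 for num in prime_str[:ID_LEN-len(id_)]:
--                     id_ += num
--                 prime_str = str(next(primes))
--             return id_
--
--         pointer += len(prime_str)
-- ===== SOURCE B (Python) =====
-- from collections import defaultdict
--
-- ID_LEN = 5
--
-- def gen_primes():
--     """Using the Sieve of Erastothenes solution"""
--     composites = defaultdict(list)
--     checker = 2
--
--     while True:
--         if checker not in composites:
--             yield checker
--             composites[checker*checker].append(checker)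
--         else:
--             for prime in composites[checker]:
--                 composites[prime+checker].append(prime)
--             del composites[checker]
--
--         checker += 1
--
-- def solution(i):
--     start = i if i >= 0 else 0
--     primes = gen_primes()
--     chunks = []
--     total = 0
--     while total < start + ID_LEN:
--         digits = str(next(primes))
--         chunks.append(digits)
--         total += len(digits)
--     s = ''.join(chunks)
--     return s[start:start + ID_LEN]
-- ===== Notes on version B (the rewrite author's own statement) =====
-- stated objective: simpler
-- what changed: Keeps gen_primes() but replaces A's pointer/threshold bookkeeping and the nested partial-slice fill loop with a single accumulate-then-slice pass: clamp a negative offset to zero, append prime-digit chunks until the joined buffer is long enough, and return the ID_LEN-character window at the offset.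
import Mathlib
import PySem

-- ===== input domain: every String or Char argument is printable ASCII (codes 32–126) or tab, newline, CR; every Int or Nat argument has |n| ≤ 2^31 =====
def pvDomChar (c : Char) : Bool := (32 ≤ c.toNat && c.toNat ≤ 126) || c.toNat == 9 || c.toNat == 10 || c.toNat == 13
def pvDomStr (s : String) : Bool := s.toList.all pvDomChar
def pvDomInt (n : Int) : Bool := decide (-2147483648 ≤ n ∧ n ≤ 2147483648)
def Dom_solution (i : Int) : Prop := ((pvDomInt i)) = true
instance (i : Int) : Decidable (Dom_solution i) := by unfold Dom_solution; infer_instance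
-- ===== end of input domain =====

-- B replaces A's pointer/threshold tracking and partial-slice fill loop with a plain
-- accumulate-then-slice pass over the same prime stream (objective: simpler).

-- ===== PORT A =====
-- gen_primes() appears verbatim in both A and B; sieveStep is one iteration of its
-- while-loop: it returns the updated 'composites' dict and 'some checker' iff this
-- iteration yields. Both ports drive this shared step with the fuel constant pvFuel
-- (a totality guard only: the Python generator is infinite). The 'composites'
-- defaultdict is only ever used for key membership / lookup / per-key append / delete
-- (its iteration order is never observed), so Std.HashMap models it exactly;
-- 'composites[k].append(v)' is insert k (getD k [] ++ [v]).
def sieveStep (composites : Std.HashMap Int (List Int)) (checker : Int) :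
    Std.HashMap Int (List Int) × Option Int :=
  if composites.contains checker then
    ((((composites.getD checker []).foldl
        (fun d prime => d.insert (prime + checker) (d.getD (prime + checker) [] ++ [prime]))
        composites).erase checker),
      none)
  else
    (composites.insert (checker * checker) (composites.getD (checker * checker) [] ++ [checker]),
      some checker)

def pvFuel : Nat := 4294967296

mutual
-- A's inner 'while len(id_) < ID_LEN' fill loop …
def solutionFill (fuel : Nat) (composites : Std.HashMap Int (List Int)) (checker : Int)
    (id_ : List Char) (prime_str : List Char) : List Char :=
  if id_.length < 5 then
    solutionFetch fuel composites checker
      ((PySem.List.slice prime_str none (some (5 - (id_.length : Int)))).foldl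
        (fun acc num => acc ++ [num]) id_)
  else id_
  termination_by (fuel, 1)
-- … whose 'prime_str = str(next(primes))' advances the generator to its next yield
def solutionFetch (fuel : Nat) (composites : Std.HashMap Int (List Int)) (checker : Int)
    (id_ : List Char) : List Char :=
  match fuel with
  | 0 => id_
  | n+1 =>
    match sieveStep composites checker with
    | (c', none) => solutionFetch n c' (checker + 1) id_
    | (c', some p) => solutionFill n c' (checker + 1) id_ (PySem.Int.toChars p)
  termination_by (fuel, 0)
end

-- A's outer 'while True' loop: skip whole primes while pointer + len(prime_str) ≤ i
def solutionSkip (fuel : Nat) (composites : Std.HashMap Int (List Int))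
    (checker pointer i : Int) : List Char :=
  match fuel with
  | 0 => []
  | n+1 =>
    match sieveStep composites checker with
    | (c', none) => solutionSkip n c' (checker + 1) pointer i
    | (c', some p) =>
      let prime_str := PySem.Int.toChars p
      let threshold := pointer + (prime_str.length : Int) - i
      if 0 < threshold then
        solutionFill n c' (checker + 1) []
          (PySem.List.slice prime_str (some (i - pointer)) none)
      else
        solutionSkip n c' (checker + 1) (pointer + (prime_str.length : Int)) i

def solution (i : Int) : String :=
  String.ofList (solutionSkip pvFuel (∅ : Std.HashMap Int (List Int)) 2 0 i)

-- ===== PORT B =====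
-- B: append str(next(primes)) chunks until total ≥ start + 5, then join and slice
def solutionAltGo (fuel : Nat) (composites : Std.HashMap Int (List Int)) (checker : Int)
    (chunks : List (List Char)) (total : Int) (start : Int) : List Char :=
  match fuel with
  | 0 => PySem.List.slice chunks.flatten (some start) (some (start + 5))
  | n+1 =>
    if total < start + 5 then
      match sieveStep composites checker with
      | (c', none) => solutionAltGo n c' (checker + 1) chunks total start
      | (c', some p) =>
        let digits := PySem.Int.toChars p
        solutionAltGo n c' (checker + 1) (chunks ++ [digits])
          (total + (digits.length : Int)) start
    else PySem.List.slice chunks.flatten (some start) (some (start + 5))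

def solution_alt (i : Int) : String :=
  String.ofList (solutionAltGo pvFuel (∅ : Std.HashMap Int (List Int)) 2 [] 0 (if 0 ≤ i then i else 0))

-- ===== PRECONDITION & SPEC =====
def Spec_solution (i : Int) (out : String) : Prop := out = solution_alt i
instance (i : Int) (out : String) : Decidable (Spec_solution i out) := by unfold Spec_solution; infer_instance

-- ===== CLAIM (what is proved, stated in full; the proofs are below) =====
def Claim_equal_solution : Prop := ∀ (i : Int), Dom_solution i → Spec_solution i (solution i)

-- ===== LEMMAS AND PROOFS =====

-- The primes the shared generator yields within 'fuel' checker steps.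
def primesFrom (fuel : Nat) (composites : Std.HashMap Int (List Int)) (checker : Int) :
    List Int :=
  match fuel with
  | 0 => []
  | n+1 =>
    match sieveStep composites checker with
    | (c', none) => primesFrom n c' (checker + 1)
    | (c', some p) => p :: primesFrom n c' (checker + 1)

-- Pure (dict-free) images of the loops, over the yielded-prime list.
mutual
def aFillL (L : List Int) (id_ : List Char) (prime_str : List Char) : List Char :=
  if id_.length < 5 then
    aFetchL L ((PySem.List.slice prime_str none (some (5 - (id_.length : Int)))).foldl
      (fun acc num => acc ++ [num]) id_)
  else id_
  termination_by (L.length, 1)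
def aFetchL (L : List Int) (id_ : List Char) : List Char :=
  match L with
  | [] => id_
  | p :: L' => aFillL L' id_ (PySem.Int.toChars p)
  termination_by (L.length, 0)
end

def aSkipL (L : List Int) (pointer i : Int) : List Char :=
  match L with
  | [] => []
  | p :: L' =>
    let prime_str := PySem.Int.toChars p
    if 0 < pointer + (prime_str.length : Int) - i then
      aFillL L' [] (PySem.List.slice prime_str (some (i - pointer)) none)
    else aSkipL L' (pointer + (prime_str.length : Int)) i

def bGoL (L : List Int) (chunks : List (List Char)) (total start : Int) : List Char :=
  match L with
  | [] => PySem.List.slice chunks.flatten (some start) (some (start + 5))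
  | p :: L' =>
    if total < start + 5 then
      bGoL L' (chunks ++ [PySem.Int.toChars p])
        (total + ((PySem.Int.toChars p).length : Int)) start
    else PySem.List.slice chunks.flatten (some start) (some (start + 5))

def digitsOf (L : List Int) : List Char := L.flatMap PySem.Int.toChars

-- ---- bridges: fueled loops = pure loops over primesFrom ----
theorem bGoL_stop (L : List Int) (chunks : List (List Char)) (total start : Int)
    (h : ¬(total < start + 5)) :
    bGoL L chunks total start
      = PySem.List.slice chunks.flatten (some start) (some (start + 5)) := by
  cases L <;> simp [bGoL, h]

theorem fetch_bridge : ∀ (n : Nat) (composites : Std.HashMap Int (List Int))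
    (checker : Int) (id_ : List Char),
    solutionFetch n composites checker id_ = aFetchL (primesFrom n composites checker) id_ := by
  intro n
  induction n with
  | zero =>
    intro comp c id_
    simp [solutionFetch, primesFrom, aFetchL]
  | succ n ih =>
    intro comp c id_
    rw [solutionFetch, primesFrom]
    rcases h : sieveStep comp c with ⟨c', o⟩
    cases o with
    | none => simpa using ih c' (c + 1) id_
    | some p =>
      simp only
      rw [aFetchL, solutionFill, aFillL]
      split
      · exact ih ..
      · rfl

theorem fill_bridge (n : Nat) (composites : Std.HashMap Int (List Int)) (checker : Int)
    (id_ prime_str : List Char) :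
    solutionFill n composites checker id_ prime_str
      = aFillL (primesFrom n composites checker) id_ prime_str := by
  rw [solutionFill, aFillL]
  split
  · exact fetch_bridge ..
  · rfl

theorem skip_bridge : ∀ (n : Nat) (composites : Std.HashMap Int (List Int))
    (checker pointer i : Int),
    solutionSkip n composites checker pointer i
      = aSkipL (primesFrom n composites checker) pointer i := by
  intro n
  induction n with
  | zero =>
    intro comp c pointer i
    simp [solutionSkip, primesFrom, aSkipL]
  | succ n ih =>
    intro comp c pointer i
    rw [solutionSkip, primesFrom]
    rcases h : sieveStep comp c with ⟨c', o⟩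
    cases o with
    | none => simpa using ih c' (c + 1) pointer i
    | some p =>
      simp only
      rw [aSkipL]
      split
      · exact fill_bridge ..
      · exact ih ..

theorem alt_bridge : ∀ (n : Nat) (composites : Std.HashMap Int (List Int))
    (checker : Int) (chunks : List (List Char)) (total start : Int),
    solutionAltGo n composites checker chunks total start
      = bGoL (primesFrom n composites checker) chunks total start := by
  intro n
  induction n with
  | zero =>
    intro comp c chunks total start
    rw [solutionAltGo, primesFrom, bGoL]
  | succ n ih =>
    intro comp c chunks total start
    rw [solutionAltGo, primesFrom]
    split
    · rcases h : sieveStep comp c with ⟨c', o⟩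
      cases o with
      | none => simpa using ih c' (c + 1) chunks total start
      | some p =>
        simp only
        rw [bGoL]
        split
        · exact ih ..
        · omega
    · rename_i hs
      rcases h : sieveStep comp c with ⟨c', o⟩
      cases o with
      | none => rw [bGoL_stop _ _ _ _ hs]
      | some p => simp only; rw [bGoL_stop _ _ _ _ hs]

-- ---- value characterisations of the pure loops ----
theorem slice_window (s : List Char) (start : Int) (h : 0 ≤ start) :
    PySem.List.slice s (some start) (some (start + 5)) = (s.drop start.toNat).take 5 := by
  rw [PySem.List.slice_toNat s h (by omega)]
  congr 1
  omega

theorem aFillL_val : ∀ (L : List Int) (id_ prime_str : List Char), id_.length < 5 →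
    aFillL L id_ prime_str = (id_ ++ prime_str ++ digitsOf L).take 5 := by
  have htake : ∀ (a b : List Char), a.length < 5 → (a ++ b).take 5 = a ++ b.take (5 - a.length) := by
    intro a b ha
    rw [List.take_append, List.take_of_length_le (by omega)]
  intro L
  induction L with
  | nil =>
    intro id_ ps h
    rw [aFillL]
    simp only [h, if_pos]
    rw [aFetchL, PySem.List.foldl_append_singleton_eq_self,
      PySem.List.slice_to _ (by omega : (0:Int) ≤ 5 - (id_.length : Int))]
    have : ((5:Int) - (id_.length : Int)).toNat = 5 - id_.length := by omega
    rw [this]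
    simp [digitsOf, htake _ _ h]
  | cons q L ih =>
    intro id_ ps h
    rw [aFillL]
    simp only [h, if_pos]
    rw [PySem.List.foldl_append_singleton_eq_self,
      PySem.List.slice_to _ (by omega : (0:Int) ≤ 5 - (id_.length : Int))]
    have hcast : ((5:Int) - (id_.length : Int)).toNat = 5 - id_.length := by omega
    rw [hcast, aFetchL]
    by_cases h5 : (id_ ++ ps.take (5 - id_.length)).length < 5
    · have hps : ps.take (5 - id_.length) = ps := by
        apply List.take_of_length_le
        simp at h5
        omega
      rw [ih _ _ h5, hps]
      simp [digitsOf]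
    · rw [aFillL]
      simp only [h5, if_neg, not_false_iff]
      have hlen : 5 ≤ (id_ ++ ps).length := by simp at h5 ⊢; omega
      rw [show id_ ++ ps ++ digitsOf (q :: L) = (id_ ++ ps) ++ digitsOf (q :: L) by simp,
        List.take_append_of_le_length hlen, htake _ _ h]

theorem aSkipL_val : ∀ (L : List Int) (pointer i : Int), 0 ≤ pointer → pointer ≤ i →
    aSkipL L pointer i = ((digitsOf L).drop (i - pointer).toNat).take 5 := by
  intro L
  induction L with
  | nil =>
    intro pointer i _ _
    rw [aSkipL]
    simp [digitsOf]
  | cons p L ih =>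
    intro pointer i h0 hpi
    rw [aSkipL]
    split
    · rename_i ht
      rw [PySem.List.slice_from _ (by omega : 0 ≤ i - pointer)]
      rw [aFillL_val L _ _ (by simp)]
      have hn : (i - pointer).toNat ≤ (PySem.Int.toChars p).length := by omega
      simp only [digitsOf, List.flatMap_cons, List.nil_append]
      rw [List.drop_append_of_le_length hn]
    · rename_i ht
      rw [ih _ _ (by omega) (by omega)]
      have hsplit : (i - pointer).toNat
          = (PySem.Int.toChars p).length + (i - (pointer + (PySem.Int.toChars p).length)).toNat := by
        omega
      simp only [digitsOf, List.flatMap_cons]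
      rw [hsplit, List.drop_length_add_append]

theorem bGoL_val : ∀ (L : List Int) (chunks : List (List Char)) (total start : Int),
    0 ≤ start → total = (chunks.flatten.length : Int) →
    bGoL L chunks total start
      = ((chunks.flatten ++ digitsOf L).drop start.toNat).take 5 := by
  intro L
  induction L with
  | nil =>
    intro chunks total start h ht
    rw [bGoL, slice_window _ start h]
    simp [digitsOf]
  | cons p L ih =>
    intro chunks total start h ht
    rw [bGoL]
    have hlen : (chunks ++ [PySem.Int.toChars p]).flatten.length
        = chunks.flatten.length + (PySem.Int.toChars p).length := by simp
    split
    · rw [ih _ _ _ h (by push_cast [hlen]; omega)]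
      simp [digitsOf]
    · rename_i hs
      rw [slice_window _ start h]
      have h1 : start.toNat + 5 ≤ chunks.flatten.length := by omega
      rw [List.drop_append_of_le_length (by omega),
        List.take_append_of_le_length (by rw [List.length_drop]; omega)]

theorem primesFrom_yield (n : Nat) (comp d' : Std.HashMap Int (List Int)) (c p : Int)
    (h : sieveStep comp c = (d', some p)) :
    primesFrom (n+1) comp c = p :: primesFrom n d' (c+1) := by
  rw [primesFrom, h]

theorem digitsOf_cons (p : Int) (L : List Int) :
    digitsOf (p :: L) = PySem.Int.toChars p ++ digitsOf L := by
  simp [digitsOf]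

theorem primesFrom_head :
    ∃ L', primesFrom pvFuel (∅ : Std.HashMap Int (List Int)) 2 = 2 :: L' := by
  have h : pvFuel = 4294967295 + 1 := by norm_num [pvFuel]
  have hs : sieveStep (∅ : Std.HashMap Int (List Int)) 2
      = ((∅ : Std.HashMap Int (List Int)).insert 4 [2], some 2) := by
    simp [sieveStep]
  exact ⟨_, by rw [h, primesFrom_yield _ _ _ _ _ hs]⟩

-- ===== VERDICT (by name: the statement is the Claim_ definition above) =====
theorem solution_spec : Claim_equal_solution := by
  intro i _
  unfold Spec_solution solution solution_alt
  apply congrArg String.ofList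
  rw [skip_bridge, alt_bridge]
  by_cases hi : 0 ≤ i
  · rw [if_pos hi, aSkipL_val _ 0 i le_rfl hi, bGoL_val _ [] 0 i hi (by simp),
      List.flatten_nil, List.nil_append, Int.sub_zero]
  · rw [if_neg hi, bGoL_val _ [] 0 0 le_rfl (by simp)]
    obtain ⟨L', hL⟩ := primesFrom_head
    rw [hL, aSkipL]
    have h2 : PySem.Int.toChars 2 = ['2'] := by rfl
    simp only [h2, List.length_cons, List.length_nil]
    rw [if_pos (by omega : (0:Int) < 0 + ((0:Nat) + 1 : Nat) - i)]
    have hneg : i - 0 = -((((-i).toNat : Nat)) : Int) := by omega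
    have hsl : PySem.List.slice ['2'] (some (i - 0)) none = ['2'] := by
      rw [PySem.List.slice_some_none, hneg,
        PySem.List.clampIdx_neg_natCast _ _ (by omega : 0 < (-i).toNat)]
      have h10 : (1 : Nat) - (-i).toNat = 0 := by omega
      rw [show (['2'] : List Char).length = 1 from rfl, h10, List.drop_zero]
    rw [hsl, aFillL_val L' _ _ (by simp), digitsOf_cons, h2]
    simp only [List.nil_append, List.flatten_nil, Int.toNat_zero, List.drop_zero]
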